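-- pv_equiv track=rewrite | github.com/malkab/mlktools-pylogseq | src/pylogseq/pylogseq/mdlogseq/elements_parsers/processmultitags.py | processMultiTags
-- ===== SOURCE A (Python) =====
-- def processMultiTags(tag):
--   out = []
--   sp = str.split(tag, "/")
--
--   for i in sp:
--     if len(out) == 0:
--       out.append(i.strip())
--     else:
--       out.append((out[-1]+"/"+i).strip())
--
--   return out
-- ===== SOURCE B (Python) =====
-- def processMultiTags(tag):
--   parts = tag.split("/")
--   norm = [parts[0].strip()] + [p.rstrip() for p in parts[1:]]
--   return ["/".join(norm[:k + 1]) for k in range(len(norm))]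
-- ===== Notes on version B (the rewrite author's own statement) =====
-- stated objective: alternative
-- what changed: Replaces the running accumulator that re-reads out[-1] and re-strips the whole growing string with a two-pass decomposition: first normalize the parts (strip the first, rstrip the rest), then emit slash-joins of growing prefixes of the normalized table.
import Mathlib
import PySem

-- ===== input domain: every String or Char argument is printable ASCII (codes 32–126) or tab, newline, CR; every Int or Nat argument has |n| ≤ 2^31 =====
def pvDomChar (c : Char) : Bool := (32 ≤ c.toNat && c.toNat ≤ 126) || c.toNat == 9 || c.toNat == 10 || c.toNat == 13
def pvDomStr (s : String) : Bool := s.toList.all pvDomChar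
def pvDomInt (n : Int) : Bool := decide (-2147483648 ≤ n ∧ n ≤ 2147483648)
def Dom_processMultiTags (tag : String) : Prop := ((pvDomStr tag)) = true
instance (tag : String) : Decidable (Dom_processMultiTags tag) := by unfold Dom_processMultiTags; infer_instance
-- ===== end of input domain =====

-- B re-decomposes A: normalize the split parts once (strip the first, rstrip the rest),
-- then join growing prefixes — no running accumulator re-reading out[-1]; same cost.
-- Strings are handled as lists of code points (PySem.Chars), exact per the PySem convention.

-- ===== PORT A =====
-- one loop step of A: append strip(i) when out is empty, else strip(out[-1] + "/" + i)
def pmtStepA (out : List (List Char)) (i : List Char) : List (List Char) :=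
  if out.length = 0 then out ++ [PySem.Chars.strip i]
  else out ++ [PySem.Chars.strip (((PySem.List.pyGet? out (-1)).getD []) ++ '/' :: i)]

def processMultiTags (tag : String) : List String :=
  (((PySem.Chars.splitOn tag.toList ['/']).foldl pmtStepA []).map String.mk)

-- ===== PORT B =====
-- normalized parts table: strip() the first part, rstrip() every later one
def pmtNorm (parts : List (List Char)) : List (List Char) :=
  match parts with
  | [] => []
  | h :: t => PySem.Chars.strip h :: t.map PySem.Chars.rstrip

def processMultiTags_alt (tag : String) : List String :=
  let norm := pmtNorm (PySem.Chars.splitOn tag.toList ['/'])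
  ((List.range norm.length).map
    (fun k => PySem.Chars.join ['/'] (norm.take (k + 1)))).map String.mk

-- ===== PRECONDITION & SPEC =====
def Spec_processMultiTags (tag : String) (out : List String) : Prop := out = processMultiTags_alt tag
instance (tag : String) (out : List String) : Decidable (Spec_processMultiTags tag out) := by unfold Spec_processMultiTags; infer_instance

-- ===== CLAIM (what is proved, stated in full; the proofs are below) =====
def Claim_equal_processMultiTags : Prop := ∀ (tag : String), Dom_processMultiTags tag → Spec_processMultiTags tag (processMultiTags tag)

-- ===== LEMMAS AND PROOFS =====

-- the chain of values A appends after the first, as explicit recursion over normalized parts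
def pmtJoins (a : List Char) (ns : List (List Char)) : List (List Char) :=
  match ns with
  | [] => []
  | n :: ns => (a ++ '/' :: n) :: pmtJoins (a ++ '/' :: n) ns

theorem pmt_head_not_space (a' : List Char) (c : Char)
    (h : List.dropWhile PySem.Chars.isspace (c :: a') = c :: a') : PySem.Chars.isspace c = false := by
  by_contra hc
  rw [List.dropWhile_cons, if_pos (by simpa using hc)] at h
  have := List.length_dropWhile_le PySem.Chars.isspace a'
  rw [h] at this
  simp at this

theorem pmt_lstrip_append_slash (a i : List Char) (ha : PySem.Chars.lstrip a = a) :
    PySem.Chars.lstrip (a ++ '/' :: i) = a ++ '/' :: i := by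
  simp only [PySem.Chars.lstrip] at *
  rw [List.dropWhile_append, ha]
  cases a with
  | nil => simp [show PySem.Chars.isspace '/' = false from by decide]
  | cons c a' => simp

theorem pmt_rstrip_append_slash (a i : List Char) :
    PySem.Chars.rstrip (a ++ '/' :: i) = a ++ '/' :: PySem.Chars.rstrip i := by
  simp only [PySem.Chars.rstrip, List.reverse_append, List.reverse_cons]
  rw [List.append_assoc, List.singleton_append, List.dropWhile_append]
  by_cases h : (List.dropWhile PySem.Chars.isspace i.reverse).isEmpty
  · rw [if_pos h]
    rw [List.isEmpty_iff] at h
    rw [h]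
    simp [show PySem.Chars.isspace '/' = false from by decide]
  · rw [if_neg h]
    simp

theorem pmt_strip_append_slash (a i : List Char) (ha : PySem.Chars.lstrip a = a) :
    PySem.Chars.strip (a ++ '/' :: i) = a ++ '/' :: PySem.Chars.rstrip i := by
  simp only [PySem.Chars.strip]
  rw [pmt_lstrip_append_slash a i ha, pmt_rstrip_append_slash]

theorem pmt_lstrip_rstrip (a : List Char) (ha : PySem.Chars.lstrip a = a) :
    PySem.Chars.lstrip (PySem.Chars.rstrip a) = PySem.Chars.rstrip a := by
  cases a with
  | nil => rfl
  | cons c a' =>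
    have hc : PySem.Chars.isspace c = false := pmt_head_not_space a' c ha
    simp only [PySem.Chars.rstrip, PySem.Chars.lstrip, List.reverse_cons, List.dropWhile_append]
    by_cases h : (List.dropWhile PySem.Chars.isspace a'.reverse).isEmpty
    · rw [if_pos h]
      simp [hc]
    · rw [if_neg h]
      rw [List.isEmpty_iff] at h
      obtain ⟨d, ds, hds⟩ : ∃ d ds, List.dropWhile PySem.Chars.isspace a'.reverse = ds ++ [d] := by
        rcases (List.dropWhile PySem.Chars.isspace a'.reverse).eq_nil_or_concat with h1 | ⟨ds, d, h1⟩
        · exact absurd h1 h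
        · exact ⟨d, ds, by simpa using h1⟩
      rw [hds]
      simp [hc]

theorem pmt_lstrip_strip (x : List Char) :
    PySem.Chars.lstrip (PySem.Chars.strip x) = PySem.Chars.strip x := by
  simp only [PySem.Chars.strip]
  exact pmt_lstrip_rstrip _ (List.dropWhile_idempotent _ _)

-- A's loop, started after its first element, produces exactly the chain pmtJoins
theorem pmt_foldl (t : List (List Char)) (acc : List (List Char)) (a : List Char)
    (ha : PySem.Chars.lstrip a = a) :
    t.foldl pmtStepA (acc ++ [a]) = acc ++ [a] ++ pmtJoins a (t.map PySem.Chars.rstrip) := by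
  induction t generalizing acc a with
  | nil => simp [pmtJoins]
  | cons i t ih =>
    have hstep : pmtStepA (acc ++ [a]) i = (acc ++ [a]) ++ [a ++ '/' :: PySem.Chars.rstrip i] := by
      simp only [pmtStepA]
      rw [if_neg (by simp)]
      have hget : (PySem.List.pyGet? (acc ++ [a]) (-1)).getD [] = a := by
        simp [PySem.List.pyGet?, PySem.List.pyIdx?]
      rw [hget, pmt_strip_append_slash a i ha]
    rw [List.foldl_cons, hstep,
        ih (acc ++ [a]) (a ++ '/' :: PySem.Chars.rstrip i)
           (pmt_lstrip_append_slash a (PySem.Chars.rstrip i) ha)]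
    simp [pmtJoins]

theorem pmt_join_merge (a n : List Char) (r : List (List Char)) :
    PySem.Chars.join ['/'] (a :: n :: r) = PySem.Chars.join ['/'] ((a ++ '/' :: n) :: r) := by
  cases r with
  | nil => rw [PySem.Chars.join_cons_cons]; simp [PySem.Chars.join_singleton]
  | cons z r' =>
    rw [PySem.Chars.join_cons_cons, PySem.Chars.join_cons_cons, PySem.Chars.join_cons_cons]
    simp

-- B's prefix-join table over a :: ns is a followed by the chain pmtJoins
theorem pmt_prefix_joins (ns : List (List Char)) (a : List Char) :
    (List.range (ns.length + 1)).map
      (fun k => PySem.Chars.join ['/'] ((a :: ns).take (k + 1))) = a :: pmtJoins a ns := by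
  induction ns generalizing a with
  | nil => simp [pmtJoins, PySem.Chars.join_singleton]
  | cons n ns ih =>
    rw [List.length_cons, List.range_succ_eq_map, List.map_cons, List.map_map]
    have h0 : PySem.Chars.join ['/'] ((a :: n :: ns).take (0 + 1)) = a := by
      simp [PySem.Chars.join_singleton]
    have hf : ((List.range (ns.length + 1)).map
        (fun k => PySem.Chars.join ['/'] ((a :: n :: ns).take (k + 1 + 1)))) =
        (List.range (ns.length + 1)).map
        (fun k => PySem.Chars.join ['/'] (((a ++ '/' :: n) :: ns).take (k + 1))) := by
      apply List.map_congr_left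
      intro k hk
      rw [List.take_succ_cons, List.take_succ_cons, pmt_join_merge, ← List.take_succ_cons]
    simp only [Function.comp_def, Nat.succ_eq_add_one]
    rw [h0, hf, ih (a ++ '/' :: n)]
    rfl

-- ===== VERDICT (by name: the statement is the Claim_ definition above) =====
theorem processMultiTags_spec : Claim_equal_processMultiTags := by
  intro tag _
  unfold Spec_processMultiTags processMultiTags processMultiTags_alt
  cases h : PySem.Chars.splitOn tag.toList ['/'] with
  | nil => simp [pmtNorm]
  | cons hd t =>
    have hfirst : pmtStepA [] hd = [] ++ [PySem.Chars.strip hd] := by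
      simp [pmtStepA]
    rw [List.foldl_cons, hfirst,
        pmt_foldl t [] (PySem.Chars.strip hd) (pmt_lstrip_strip hd)]
    simp only [pmtNorm, List.length_cons]
    rw [pmt_prefix_joins (t.map PySem.Chars.rstrip) (PySem.Chars.strip hd)]
    simp
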